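-- pv_equiv track=rewrite | github.com/jpms2/data-science | graphs.py | normalize_height
-- ===== SOURCE A (Python) =====
-- def normalize_height(height):
-- 	value = [0,0,0,0,0,0,0,0]
--
-- 	for w in height:
-- 		if int(w) < 140:
-- 			value[0] += 1
-- 		elif int(w) >= 140 and int(w) < 160:
-- 			value[1] += 1
-- 		elif int(w) >= 160 and int(w) < 170:
-- 			value[2] += 1
-- 		elif int(w) >= 170 and int(w) < 180:
-- 			value[3] += 1
-- 		elif int(w) >= 180 and int(w) < 190:
-- 			value[4] += 1
-- 		elif int(w) >= 190 and int(w) < 200: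
-- 			value[5] += 1
-- 		elif int(w) >= 200 and int(w) < 220:
-- 			value[6] += 1
-- 		else:
-- 			value[7] += 1
-- 	return value
-- ===== SOURCE B (Python) =====
-- def normalize_height(height):
--     bounds = (140, 160, 170, 180, 190, 200, 220)
--     cuts = [sum(1 for w in height if int(w) < b) for b in bounds]
--     edges = [0] + cuts + [len(height)]
--     return [edges[i + 1] - edges[i] for i in range(8)]
-- ===== Notes on version B (the rewrite author's own statement) =====
-- stated objective: alternative
-- what changed: Instead of a single pass that classifies each element with an 8-way if-elif cascade into a mutable histogram, B makes staged passes: it computes the cumulative count of elements below each boundary, then returns the adjacent differences of those cumulative counts.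
import Mathlib
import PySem

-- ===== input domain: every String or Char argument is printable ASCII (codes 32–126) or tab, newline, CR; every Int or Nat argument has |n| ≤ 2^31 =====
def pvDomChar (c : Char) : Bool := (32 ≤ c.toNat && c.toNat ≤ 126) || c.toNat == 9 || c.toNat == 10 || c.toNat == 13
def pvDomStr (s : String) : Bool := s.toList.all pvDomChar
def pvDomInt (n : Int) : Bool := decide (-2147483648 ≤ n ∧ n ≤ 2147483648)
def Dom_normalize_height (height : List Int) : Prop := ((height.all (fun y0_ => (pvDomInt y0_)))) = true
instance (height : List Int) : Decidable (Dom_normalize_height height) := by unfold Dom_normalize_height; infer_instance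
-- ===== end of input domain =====

-- B replaces A's single-pass if-elif histogram by staged passes: the cumulative count of
-- elements below each boundary is computed first, the buckets are the adjacent differences
-- (objective: alternative; same O(n) cost).

-- ===== PORT A =====
-- one iteration of A's for-loop: the if-elif cascade incrementing one of 8 counters
def pvStepA (value : List Int) (w : Int) : List Int :=
  if w < 140 then value.modify 0 (· + 1)
  else if 140 ≤ w ∧ w < 160 then value.modify 1 (· + 1)
  else if 160 ≤ w ∧ w < 170 then value.modify 2 (· + 1)
  else if 170 ≤ w ∧ w < 180 then value.modify 3 (· + 1)
  else if 180 ≤ w ∧ w < 190 then value.modify 4 (· + 1)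
  else if 190 ≤ w ∧ w < 200 then value.modify 5 (· + 1)
  else if 200 ≤ w ∧ w < 220 then value.modify 6 (· + 1)
  else value.modify 7 (· + 1)

def normalize_height (height : List Int) : List Int :=
  height.foldl pvStepA [0, 0, 0, 0, 0, 0, 0, 0]

-- ===== PORT B =====
-- sum(1 for w in height if int(w) < b)
def pvCut (height : List Int) (b : Int) : Int :=
  height.foldl (fun acc w => if w < b then acc + 1 else acc) 0

def normalize_height_alt (height : List Int) : List Int :=
  let cuts := ([140, 160, 170, 180, 190, 200, 220] : List Int).map (pvCut height)
  let edges := 0 :: (cuts ++ [(height.length : Int)])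
  (List.range 8).map (fun i => edges.getD (i + 1) 0 - edges.getD i 0)

-- ===== PRECONDITION & SPEC =====
def Spec_normalize_height (height : List Int) (out : List Int) : Prop := out = normalize_height_alt height
instance (height : List Int) (out : List Int) : Decidable (Spec_normalize_height height out) := by unfold Spec_normalize_height; infer_instance

-- ===== CLAIM (what is proved, stated in full; the proofs are below) =====
def Claim_equal_normalize_height : Prop := ∀ (height : List Int), Dom_normalize_height height → Spec_normalize_height height (normalize_height height)

-- ===== LEMMAS AND PROOFS =====

-- Int-valued count of elements satisfying p (proof-side canonical form of both programs)
def pvCnt (p : Int → Bool) : List Int → Int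
  | [] => 0
  | w :: t => (if p w then 1 else 0) + pvCnt p t

theorem pvCut_foldl_eq (b : Int) (h : List Int) : ∀ acc : Int,
    h.foldl (fun acc w => if w < b then acc + 1 else acc) acc
      = acc + pvCnt (fun w => decide (w < b)) h := by
  induction h with
  | nil => intro acc; simp [pvCnt]
  | cons w t ih =>
    intro acc
    simp only [List.foldl_cons, pvCnt, ih]
    by_cases hw : w < b <;> simp [hw] <;> ring

theorem pvCnt_split (a b : Int) (hab : a ≤ b) (h : List Int) :
    pvCnt (fun w => decide (w < b)) h
      = pvCnt (fun w => decide (w < a)) h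
        + pvCnt (fun w => decide (a ≤ w ∧ w < b)) h := by
  induction h with
  | nil => simp [pvCnt]
  | cons w t ih =>
    simp only [pvCnt, ih]
    by_cases h1 : w < a <;> by_cases h2 : w < b <;>
      simp [h1, h2, decide_eq_true_eq] <;> omega

theorem pvCnt_length (b : Int) (h : List Int) :
    (h.length : Int)
      = pvCnt (fun w => decide (w < b)) h + pvCnt (fun w => decide (b ≤ w)) h := by
  induction h with
  | nil => simp [pvCnt]
  | cons w t ih =>
    simp only [pvCnt, List.length_cons]
    push_cast
    by_cases h1 : w < b <;> simp [h1, decide_eq_true_eq] <;> omega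

-- characterization of A's loop: folding the cascade over h adds the 8 bucket counts
theorem pvFoldA (h : List Int) : ∀ a0 a1 a2 a3 a4 a5 a6 a7 : Int,
    h.foldl pvStepA [a0, a1, a2, a3, a4, a5, a6, a7] =
      [a0 + pvCnt (fun w => decide (w < 140)) h,
       a1 + pvCnt (fun w => decide (140 ≤ w ∧ w < 160)) h,
       a2 + pvCnt (fun w => decide (160 ≤ w ∧ w < 170)) h,
       a3 + pvCnt (fun w => decide (170 ≤ w ∧ w < 180)) h,
       a4 + pvCnt (fun w => decide (180 ≤ w ∧ w < 190)) h,
       a5 + pvCnt (fun w => decide (190 ≤ w ∧ w < 200)) h,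
       a6 + pvCnt (fun w => decide (200 ≤ w ∧ w < 220)) h,
       a7 + pvCnt (fun w => decide (220 ≤ w)) h] := by
  induction h with
  | nil => intro a0 a1 a2 a3 a4 a5 a6 a7; simp [pvCnt]
  | cons w t ih =>
    intro a0 a1 a2 a3 a4 a5 a6 a7
    simp only [List.foldl_cons, pvStepA]
    split_ifs with h1 h2 h3 h4 h5 h6 h7 <;>
      simp only [List.modify_succ_cons, List.modify_zero_cons] <;> rw [ih] <;>
      simp only [pvCnt, List.cons.injEq, and_true] <;>
      refine ⟨?_, ?_, ?_, ?_, ?_, ?_, ?_, ?_⟩ <;>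
      · simp only [decide_eq_true_eq]
        split_ifs <;> omega

theorem pvCut_eq (h : List Int) (b : Int) :
    pvCut h b = pvCnt (fun w => decide (w < b)) h := by
  simpa using pvCut_foldl_eq b h 0

theorem pvAlt_eq (h : List Int) :
    normalize_height_alt h =
      [pvCut h 140 - 0, pvCut h 160 - pvCut h 140, pvCut h 170 - pvCut h 160,
       pvCut h 180 - pvCut h 170, pvCut h 190 - pvCut h 180, pvCut h 200 - pvCut h 190,
       pvCut h 220 - pvCut h 200, (h.length : Int) - pvCut h 220] := by
  simp [normalize_height_alt, List.range_succ]

-- ===== VERDICT (by name: the statement is the Claim_ definition above) =====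
theorem normalize_height_spec : Claim_equal_normalize_height := by
  intro height _
  unfold Spec_normalize_height normalize_height
  rw [pvAlt_eq, pvFoldA]
  simp only [pvCut_eq]
  rw [pvCnt_length 220, pvCnt_split 200 220 (by norm_num), pvCnt_split 190 200 (by norm_num),
    pvCnt_split 180 190 (by norm_num), pvCnt_split 170 180 (by norm_num),
    pvCnt_split 160 170 (by norm_num), pvCnt_split 140 160 (by norm_num)]
  simp only [List.cons.injEq, and_true]
  refine ⟨?_, ?_, ?_, ?_, ?_, ?_, ?_, ?_⟩ <;> ring
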